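-- pv_equiv track=rewrite | github.com/offchan42/band-protocol-assignment | 1_boss_babys_revenge.py | is_good_boy
-- ===== SOURCE A (Python) =====
-- def is_good_boy(events):
--     # if Boss Baby initiates shooting, then he is a bad boy
--     if events[0] == "R":
--         return False
--
--     shots_to_revenge = 0
--     for event in events:
--         if event == "S":
--             shots_to_revenge += 1
--         elif event == "R":
--             if shots_to_revenge > 0:
--                 shots_to_revenge -= 1
--
--     # if there are no shots to revenge, then Boss Baby is a good boy
--     return shots_to_revenge == 0
-- ===== SOURCE B (Python) =====
-- def is_good_boy(events):
--     if events[0] == "R":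
--         return False
--     shots = revenges = 0
--     for event in reversed(events):
--         if event == "S":
--             shots += 1
--         elif event == "R":
--             revenges += 1
--         if shots > revenges:
--             return False
--     return True
-- ===== Notes on version B (the rewrite author's own statement) =====
-- stated objective: alternative
-- what changed: Replaces A's forward pass with a zero-clamped counter by a backward early-exit scan that checks every suffix has at least as many 'R' as 'S' (the clamped counter's final value is the maximum suffix sum, which is 0 iff all suffix sums are <= 0).
import Mathlib
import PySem

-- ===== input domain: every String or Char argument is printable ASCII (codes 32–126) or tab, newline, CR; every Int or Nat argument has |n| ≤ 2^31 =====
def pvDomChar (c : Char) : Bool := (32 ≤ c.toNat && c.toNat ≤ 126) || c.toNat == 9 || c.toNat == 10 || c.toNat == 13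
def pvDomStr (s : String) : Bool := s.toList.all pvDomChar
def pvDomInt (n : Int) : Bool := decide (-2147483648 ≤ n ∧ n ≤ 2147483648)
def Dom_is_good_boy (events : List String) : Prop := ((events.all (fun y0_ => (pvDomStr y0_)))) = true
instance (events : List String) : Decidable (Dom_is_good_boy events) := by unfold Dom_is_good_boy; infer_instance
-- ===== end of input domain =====

-- B replaces A's forward zero-clamped counter by a backward early-exit scan checking that
-- every suffix has at least as many "R" as "S" (alternative decomposition, same cost).

-- ===== PORT A =====
def is_good_boy (events : List String) : Bool :=
  if (PySem.List.pyGet? events 0).getD "" == "R" then false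
  else
    (events.foldl
      (fun (shots_to_revenge : Int) event =>
        if event == "S" then shots_to_revenge + 1
        else if event == "R" then
          (if shots_to_revenge > 0 then shots_to_revenge - 1 else shots_to_revenge)
        else shots_to_revenge)
      0) == 0

-- ===== PORT B =====
-- the reversed-iteration loop of Source B with its early `return False`
def suffixScan : List String → Int → Int → Bool
  | [], _, _ => true
  | event :: rest, shots, revenges =>
      let shots' := if event == "S" then shots + 1 else shots
      let revenges' := if event == "R" then revenges + 1 else revenges
      if shots' > revenges' then false
      else suffixScan rest shots' revenges'

def is_good_boy_alt (events : List String) : Bool :=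
  if (PySem.List.pyGet? events 0).getD "" == "R" then false
  else suffixScan events.reverse 0 0

-- ===== PRECONDITION & SPEC =====
-- Pre_ excludes exactly the empty list, on which Python A raises IndexError at events[0].
def Pre_is_good_boy (events : List String) : Prop := events ≠ []
instance (events : List String) : Decidable (Pre_is_good_boy events) := by unfold Pre_is_good_boy; infer_instance
def pvWitness_is_good_boy : List String := ["S", "R"]
def Spec_is_good_boy (events : List String) (out : Bool) : Prop := out = is_good_boy_alt events
instance (events : List String) (out : Bool) : Decidable (Spec_is_good_boy events out) := by unfold Spec_is_good_boy; infer_instance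

-- ===== CLAIM (what is proved, stated in full; the proofs are below) =====
def Claim_equal_is_good_boy : Prop := ∀ (events : List String), Dom_is_good_boy events → Pre_is_good_boy events → Spec_is_good_boy events (is_good_boy events)

-- ===== LEMMAS AND PROOFS =====

-- value of one event in the walk
def ev (e : String) : Int := if e == "S" then 1 else if e == "R" then -1 else 0

-- sum of the walk over a list
def sumL : List String → Int
  | [] => 0
  | e :: t => ev e + sumL t

-- maximum prefix sum (over all prefixes, including the empty one)
def mpre : List String → Int
  | [] => 0
  | e :: t => max 0 (ev e + mpre t)

theorem mpre_nonneg (xs : List String) : 0 ≤ mpre xs := by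
  cases xs with
  | nil => simp [mpre]
  | cons e t => simp [mpre]

theorem mpre_ge_sum (xs : List String) : sumL xs ≤ mpre xs := by
  induction xs with
  | nil => simp [sumL, mpre]
  | cons e t ih => simp only [sumL, mpre]; omega

theorem sumL_append_single (xs : List String) (e : String) :
    sumL (xs ++ [e]) = sumL xs + ev e := by
  induction xs with
  | nil => simp [sumL]
  | cons a t ih => simp only [List.cons_append, sumL, ih]; omega

theorem sumL_reverse (xs : List String) : sumL xs.reverse = sumL xs := by
  induction xs with
  | nil => rfl
  | cons a t ih => simp only [List.reverse_cons, sumL_append_single, ih, sumL]; omega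

theorem mpre_append_single (xs : List String) (e : String) :
    mpre (xs ++ [e]) = max (mpre xs) (sumL xs + ev e) := by
  induction xs with
  | nil => simp [mpre, sumL]
  | cons a t ih => simp only [List.cons_append, mpre, sumL, ih]; omega

-- B's loop returns true iff, relative to the running counts, every prefix keeps shots ≤ revenges
theorem suffixScan_iff (xs : List String) :
    ∀ s r : Int, s ≤ r → (suffixScan xs s r = true ↔ s - r + mpre xs ≤ 0) := by
  induction xs with
  | nil => intro s r h; simp [suffixScan, mpre]; omega
  | cons e t ih =>
    intro s r h
    have h0 := mpre_nonneg t
    by_cases hS : e = "S"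
    · subst hS
      simp only [suffixScan, mpre, show (("S" : String) == "S") = true from rfl,
        show (("S" : String) == "R") = false from rfl, show ev "S" = (1 : Int) from rfl,
        if_true, Bool.false_eq_true, if_false]
      by_cases hgt : s + 1 > r
      · rw [if_pos hgt]
        constructor
        · intro hfalse; cases hfalse
        · intro hle; omega
      · rw [if_neg hgt, ih (s + 1) r (by omega)]
        omega
    · by_cases hR : e = "R"
      · subst hR
        simp only [suffixScan, mpre, show (("R" : String) == "S") = false from rfl,
          show (("R" : String) == "R") = true from rfl, show ev "R" = (-1 : Int) from rfl,
          if_true, Bool.false_eq_true, if_false]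
        have hgt : ¬ (s > r + 1) := by omega
        rw [if_neg hgt, ih s (r + 1) (by omega)]
        omega
      · have hS' : (e == "S") = false := beq_eq_false_iff_ne.mpr hS
        have hR' : (e == "R") = false := beq_eq_false_iff_ne.mpr hR
        simp only [suffixScan, mpre, ev, hS', hR', Bool.false_eq_true, if_false]
        have hgt : ¬ (s > r) := by omega
        rw [if_neg hgt, ih s r h]
        omega

-- A's clamped left fold computes the maximum suffix sum (= maximum prefix sum of the reverse)
theorem foldl_clamp_eq (xs : List String) :
    ∀ s : Int, 0 ≤ s →
      (xs.foldl
        (fun (shots_to_revenge : Int) event =>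
          if event == "S" then shots_to_revenge + 1
          else if event == "R" then
            (if shots_to_revenge > 0 then shots_to_revenge - 1 else shots_to_revenge)
          else shots_to_revenge)
        s)
      = max (s + sumL xs) (mpre xs.reverse) := by
  induction xs with
  | nil => intro s hs; simp [sumL, mpre]; omega
  | cons e t ih =>
    intro s hs
    have hrev : mpre ((e :: t).reverse) = max (mpre t.reverse) (sumL t + ev e) := by
      rw [List.reverse_cons, mpre_append_single, sumL_reverse]
    have h0 := mpre_nonneg t.reverse
    have hge : sumL t ≤ mpre t.reverse := by
      have := mpre_ge_sum t.reverse; rwa [sumL_reverse] at this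
    rw [hrev]
    simp only [List.foldl_cons, sumL]
    by_cases hS : e = "S"
    · subst hS
      simp only [show (("S" : String) == "S") = true from rfl,
        show ev "S" = (1 : Int) from rfl, if_true]
      rw [ih (s + 1) (by omega)]
      omega
    · by_cases hR : e = "R"
      · subst hR
        simp only [show (("R" : String) == "S") = false from rfl,
          show (("R" : String) == "R") = true from rfl, show ev "R" = (-1 : Int) from rfl,
          if_true, Bool.false_eq_true, if_false]
        by_cases hpos : s > 0
        · rw [if_pos hpos, ih (s - 1) (by omega)]
          omega
        · rw [if_neg hpos, ih s hs]
          omega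
      · have hS' : (e == "S") = false := beq_eq_false_iff_ne.mpr hS
        have hR' : (e == "R") = false := beq_eq_false_iff_ne.mpr hR
        have hev : ev e = 0 := by simp [ev, hS', hR']
        simp only [hS', hR', Bool.false_eq_true, if_false, hev]
        rw [ih s hs]
        omega

-- ===== VERDICT (by name: the statement is the Claim_ definition above) =====
theorem is_good_boy_spec : Claim_equal_is_good_boy := by
  intro events _ _
  unfold Spec_is_good_boy is_good_boy is_good_boy_alt
  by_cases hR : (PySem.List.pyGet? events 0).getD "" == "R"
  · simp [hR]
  · simp only [hR, Bool.false_eq_true, if_false]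
    have hA := foldl_clamp_eq events 0 (by omega)
    have hB := suffixScan_iff events.reverse 0 0 (by omega)
    have h0 := mpre_nonneg events.reverse
    have hge : sumL events ≤ mpre events.reverse := by
      have := mpre_ge_sum events.reverse; rwa [sumL_reverse] at this
    rw [hA]
    by_cases hgs : suffixScan events.reverse 0 0 = true
    · rw [hgs]
      have hx := hB.mp hgs
      have hz : max (0 + sumL events) (mpre events.reverse) = 0 := by omega
      rw [hz]
      rfl
    · have hgs' : suffixScan events.reverse 0 0 = false := by
        revert hgs; cases suffixScan events.reverse 0 0 <;> simp
      rw [hgs']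
      have hx : ¬ ((0 : Int) - 0 + mpre events.reverse ≤ 0) := fun hle => hgs (hB.mpr hle)
      simp only [beq_eq_false_iff_ne, ne_eq]
      omega
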